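-- pv_equiv track=rewrite | github.com/matpower-dev/Projects | slice_pizzabot/build/lib/pizzapackage/src/pizza.py | extractDriverInstructions
-- ===== SOURCE A (Python) =====
-- def subtractVectors(vec1,vec2):
--      return tuple([i - j for i, j in zip(vec1, vec2)])
--
-- def extractDriverInstructions(directionsList):
--    driverInstructionsList =  [None] * len(directionsList )
--
--    for i,iter_tuple in enumerate(directionsList):
--          if i==0:
--                 driverInstructions = subtractVectors(directionsList[i], (0,0))
--          else:
--                 driverInstructions = subtractVectors(directionsList[i], directionsList[i-1])
--          driverInstructionsList[i] = driverInstructions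
--    return driverInstructionsList
-- ===== SOURCE B (Python) =====
-- def subtractVectors(vec1, vec2):
--     return tuple([i - j for i, j in zip(vec1, vec2)])
--
-- def extractDriverInstructions(directionsList):
--     # Structural recursion carrying the previous position as an accumulator:
--     # no indexing, no enumerate, no i==0 branch.
--     def go(prev, rest):
--         if not rest:
--             return []
--         cur = rest[0]
--         return [subtractVectors(cur, prev)] + go(cur, rest[1:])
--     return go((0, 0), directionsList)
-- ===== Notes on version B (the rewrite author's own statement) =====
-- stated objective: alternative
-- what changed: Replaces the indexed enumerate loop with an i==0 branch and xs[i-1] lookups by a structural recursion over the list that carries the previous position as an accumulator (origin (0,0) as the initial accumulator), eliminating all indexing.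
import Mathlib
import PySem

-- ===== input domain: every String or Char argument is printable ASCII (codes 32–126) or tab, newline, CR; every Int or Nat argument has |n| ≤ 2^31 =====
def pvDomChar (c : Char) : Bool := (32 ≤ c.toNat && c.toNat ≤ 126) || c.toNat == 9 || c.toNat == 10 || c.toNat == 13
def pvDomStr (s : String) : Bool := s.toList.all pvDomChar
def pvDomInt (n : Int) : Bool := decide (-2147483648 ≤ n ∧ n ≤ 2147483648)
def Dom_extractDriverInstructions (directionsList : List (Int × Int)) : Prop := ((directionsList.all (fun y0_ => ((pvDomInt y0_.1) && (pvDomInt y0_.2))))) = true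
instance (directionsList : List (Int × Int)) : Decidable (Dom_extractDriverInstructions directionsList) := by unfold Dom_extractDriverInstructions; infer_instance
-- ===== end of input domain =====

-- B replaces the indexed enumerate loop (with its i==0 branch) by a structural recursion
-- carrying the previous position as an accumulator (alternative decomposition, same cost).


-- ===== PORT A =====
-- subtractVectors on pairs of ints: componentwise subtraction (exact for 2-tuples)
def subtractVectors (vec1 vec2 : Int × Int) : Int × Int := (vec1.1 - vec2.1, vec1.2 - vec2.2)

-- A: for i, _ in enumerate(xs): result[i] = sub(xs[i], (0,0) if i==0 else xs[i-1])
-- (.getD (0,0) totalizes pyGet?; the indices are always in range)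
def extractDriverInstructions (directionsList : List (Int × Int)) : List (Int × Int) :=
  (PySem.List.enumerate directionsList).map (fun p =>
    if p.1 = 0 then
      subtractVectors ((PySem.List.pyGet? directionsList p.1).getD (0,0)) (0,0)
    else
      subtractVectors ((PySem.List.pyGet? directionsList p.1).getD (0,0))
                      ((PySem.List.pyGet? directionsList (p.1 - 1)).getD (0,0)))

-- ===== PORT B =====
-- B's helper go(prev, rest): recursion on the list, previous position carried as accumulator
def goEDI (prev : Int × Int) : List (Int × Int) → List (Int × Int)
  | [] => []
  | cur :: rest => subtractVectors cur prev :: goEDI cur rest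

def extractDriverInstructions_alt (directionsList : List (Int × Int)) : List (Int × Int) :=
  goEDI (0, 0) directionsList

-- ===== PRECONDITION & SPEC =====
def Spec_extractDriverInstructions (directionsList : List (Int × Int)) (out : List (Int × Int)) : Prop := out = extractDriverInstructions_alt directionsList
instance (directionsList : List (Int × Int)) (out : List (Int × Int)) : Decidable (Spec_extractDriverInstructions directionsList out) := by unfold Spec_extractDriverInstructions; infer_instance

-- ===== CLAIM (what is proved, stated in full; the proofs are below) =====
def Claim_equal_extractDriverInstructions : Prop := ∀ (directionsList : List (Int × Int)), Dom_extractDriverInstructions directionsList → Spec_extractDriverInstructions directionsList (extractDriverInstructions directionsList)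

-- ===== LEMMAS AND PROOFS =====
theorem goEDI_length (prev : Int × Int) (xs : List (Int × Int)) :
    (goEDI prev xs).length = xs.length := by
  induction xs generalizing prev with
  | nil => rfl
  | cons x rest ih => simp [goEDI, ih]

theorem goEDI_getElem (prev : Int × Int) (xs : List (Int × Int)) (i : Nat)
    (hi : i < xs.length) (h : i < (goEDI prev xs).length) :
    (goEDI prev xs)[i] =
      subtractVectors xs[i] (if i = 0 then prev else xs[i-1]'(by omega)) := by
  induction xs generalizing prev i with
  | nil => simp at hi
  | cons x rest ih =>
    cases i with
    | zero => simp [goEDI]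
    | succ j =>
      have hj : j < rest.length := by simpa using hi
      simp only [goEDI, List.getElem_cons_succ]
      rw [ih x j hj (by simpa [goEDI_length] using hj)]
      rcases Nat.eq_zero_or_pos j with rfl | hp
      · simp
      · have : ¬ (j = 0) := by omega
        have : ¬ (j + 1 = 0) := by omega
        simp only [if_neg ‹¬ (j = 0)›, if_neg ‹¬ (j + 1 = 0)›]
        congr 1
        have hj1 : j - 1 + 1 = j := by omega
        rcases j with _ | k
        · omega
        · simp

-- ===== VERDICT (by name: the statement is the Claim_ definition above) =====
theorem extractDriverInstructions_spec : Claim_equal_extractDriverInstructions := by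
  intro xs _
  show extractDriverInstructions xs = extractDriverInstructions_alt xs
  apply List.ext_getElem
  · simp [extractDriverInstructions, extractDriverInstructions_alt,
      PySem.List.length_enumerate, goEDI_length]
  · intro i h1 h2
    have hi : i < xs.length := by
      simpa [extractDriverInstructions, PySem.List.length_enumerate] using h1
    simp only [extractDriverInstructions_alt] at h2 ⊢
    rw [goEDI_getElem (0,0) xs i hi h2]
    simp only [extractDriverInstructions, List.getElem_map, PySem.List.getElem_enumerate]
    rcases Nat.eq_zero_or_pos i with rfl | hp
    · have g1 : PySem.List.pyGet? xs (0 : Int) = some xs[0] := by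
        simpa using PySem.List.pyGet?_ofNat xs 0 hi
      simp [g1]
    · have g1 : PySem.List.pyGet? xs (i : Int) = some xs[i] :=
        PySem.List.pyGet?_ofNat xs i hi
      have g2 : PySem.List.pyGet? xs ((i : Int) - 1) = some (xs[i-1]'(by omega)) := by
        have : ((i : Int) - 1) = ((i - 1 : Nat) : Int) := by omega
        rw [this, PySem.List.pyGet?_ofNat xs (i-1) (by omega)]
      simp [g1, g2, Nat.pos_iff_ne_zero.mp hp]
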